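-- pv_equiv track=rewrite | github.com/agusfraccaro/TP1-TDA | tp2/algoritmo_resolucion.py | pd_reconstruccion
-- ===== SOURCE A (Python) =====
-- def pd_reconstruccion(soluciones):
--     filas = len(soluciones)
--     columnas = len(soluciones[0])
--
--     dias_entrenados = []
--     dias_consecutivos_por_visitar = -1
--
--     for i in range(filas - 1, -1, -1):
--
--         if dias_consecutivos_por_visitar == 0:
--             # El dia siguiente no se entrena pues son 0 los dias consecutivos
--             dias_consecutivos_por_visitar = -1
--             continue
--         else:
--             if dias_consecutivos_por_visitar == -1:
--                 # Busco la mayor ganancia para saber cuantos dias consecutivos se entrena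
--                 ganancia_maxima_de_la_fila = float('-inf')
--                 for j in range(columnas - 1, -1, -1):
--                     if soluciones[i][j] > ganancia_maxima_de_la_fila:
--                         ganancia_maxima_de_la_fila = soluciones[i][j]
--                         dias_consecutivos_por_visitar = j
--             else:
--                 # Ya se que dias consecutivos se entrena
--                 dias_consecutivos_por_visitar -= 1
--
--             dias_entrenados.append(i + 1)
--
--     return list(reversed(dias_entrenados))
-- ===== SOURCE B (Python) =====
-- def pd_reconstruccion(soluciones):
--     filas = len(soluciones)
--     columnas = len(soluciones[0])
--     # Collect the rest days: from the top, each block trains j+1 consecutive days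
--     # where j is the column of the LAST maximum of the row (A's tie-break), and the
--     # day just below the block is a rest day.
--     descansos = set()
--     i = filas - 1
--     while i >= 0:
--         fila = soluciones[i][:columnas]
--         mejor = max(fila)
--         j = columnas - 1 - fila[::-1].index(mejor)
--         i -= j + 1
--         if i >= 0:
--             descansos.add(i)
--         i -= 1
--     # The schedule is the ascending complement of the rest days.
--     return [dia + 1 for dia in range(filas) if dia not in descansos]
-- ===== Notes on version B (the rewrite author's own statement) =====
-- stated objective: alternative
-- what changed: A emits trained days one per row with a countdown state machine and reverses at the end; B instead collects only the REST days into a set (jumping past each block via max() plus a reversed-index lookup of its last occurrence) and returns the ascending complement of that set over range(filas).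
-- outside the precondition, e.g. on pd_reconstruccion([[], []]): A returns [1, 2], B raises ValueError; on pd_reconstruccion([[3, 1], [7], [0, 0]]): A returns [2, 3], B returns [2, 3]
import Mathlib
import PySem

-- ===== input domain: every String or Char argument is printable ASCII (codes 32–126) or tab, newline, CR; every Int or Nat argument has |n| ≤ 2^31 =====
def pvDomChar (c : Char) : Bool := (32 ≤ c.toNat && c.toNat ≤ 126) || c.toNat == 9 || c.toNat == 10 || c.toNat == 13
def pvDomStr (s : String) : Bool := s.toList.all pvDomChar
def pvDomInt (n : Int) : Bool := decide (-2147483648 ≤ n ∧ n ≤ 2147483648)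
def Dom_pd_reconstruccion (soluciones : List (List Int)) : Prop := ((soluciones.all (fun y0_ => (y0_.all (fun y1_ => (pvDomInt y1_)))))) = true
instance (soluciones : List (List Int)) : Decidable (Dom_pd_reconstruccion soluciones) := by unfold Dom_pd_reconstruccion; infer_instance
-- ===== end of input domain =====

-- B replaces A's per-row countdown state machine by a different computation of the same
-- schedule: it collects the REST days into a set (one per block, found by jumping past each
-- block's last-argmax column) and returns the ascending complement of that set.

-- ===== PORT A =====
-- inner loop body of A's argmax scan (ganancia_maxima as Option Int: none = float('-inf'))
def pvInner (fila : List Int) (g : Option Int × Int) (j : Int) : Option Int × Int :=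
  match g.1 with
  | none => (some (PySem.List.pyGetD fila j 0), j)
  | some b =>
      if b < PySem.List.pyGetD fila j 0 then (some (PySem.List.pyGetD fila j 0), j) else g

-- outer loop body of A: state = (dias_entrenados so far, dias_consecutivos_por_visitar)
def pvStepA (soluciones : List (List Int)) (columnas : Int)
    (st : List Int × Int) (i : Int) : List Int × Int :=
  if st.2 = 0 then (st.1, -1)
  else
    let d' :=
      if st.2 = -1 then
        ((PySem.List.pyRange (columnas - 1) (-1) (-1)).foldl
          (pvInner (PySem.List.pyGetD soluciones i [])) (none, st.2)).2
      else st.2 - 1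
    (st.1 ++ [i + 1], d')

def pd_reconstruccion (soluciones : List (List Int)) : List Int :=
  let filas : Int := soluciones.length
  let columnas : Int := (PySem.List.pyGetD soluciones 0 []).length
  let r := (PySem.List.pyRange (filas - 1) (-1) (-1)).foldl
             (pvStepA soluciones columnas) ([], -1)
  r.1.reverse

-- ===== PORT B =====
-- B's while loop, made structural by a fuel counter (soluciones.length + 1 steps always
-- suffice inside Pre_, where each iteration decreases i by at least 2; when fuel runs out the
-- loop stops exactly as when i < 0, returning the set built so far).
-- fila[::-1] is fila.reverse (PySem.List.slice?_none_none_neg_one); max(fila) and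
-- fila.index(m) are PySem.List.max? / index? (none exactly where Python raises; Pre_ excludes those).
def pdBLoop (sol : List (List Int)) (columnas : Int) :
    Nat → Int → PySem.Set Int → PySem.Set Int
  | 0, _, descansos => descansos
  | fuel + 1, i, descansos =>
    if i < 0 then descansos
    else
      let fila := PySem.List.slice (PySem.List.pyGetD sol i []) none (some columnas)
      let mejor := (PySem.List.max? fila (fun x => x)).getD 0
      let j : Int := columnas - 1 - (((PySem.List.index? fila.reverse mejor).getD 0 : Nat) : Int)
      let i2 := i - j - 1
      pdBLoop sol columnas fuel (i2 - 1)
        (if 0 ≤ i2 then PySem.Set.add descansos i2 else descansos)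

def pd_reconstruccion_alt (soluciones : List (List Int)) : List Int :=
  let filas : Int := soluciones.length
  let columnas : Int := (PySem.List.pyGetD soluciones 0 []).length
  let descansos := pdBLoop soluciones columnas (soluciones.length + 1) (filas - 1)
                     PySem.Set.empty
  ((PySem.List.pyRange 0 filas 1).filter
      (fun dia => !(PySem.Set.contains descansos dia))).map (· + 1)

-- ===== PRECONDITION & SPEC =====
-- Pre_ excludes inputs where the Python programs raise: the empty table and tables with a row
-- shorter than row 0 (A raises IndexError on the empty table and may raise IndexError on a short
-- row; conservatively all rows must reach row 0's length since which rows A indexes depends on the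
-- run), and tables whose first row is empty — there no argmax column exists, so B's max() raises
-- ValueError while A's all-days output is as defensible as any other.
def Pre_pd_reconstruccion (soluciones : List (List Int)) : Prop :=
  soluciones ≠ [] ∧
  1 ≤ (PySem.List.pyGetD soluciones 0 ([] : List Int)).length ∧
  ∀ r ∈ soluciones, (PySem.List.pyGetD soluciones 0 ([] : List Int)).length ≤ r.length
instance (soluciones : List (List Int)) : Decidable (Pre_pd_reconstruccion soluciones) := by
  unfold Pre_pd_reconstruccion; infer_instance

def pvWitness_pd_reconstruccion : List (List Int) := [[1, 2], [3, 4], [0, 5]]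

def Spec_pd_reconstruccion (soluciones : List (List Int)) (out : List Int) : Prop :=
  out = pd_reconstruccion_alt soluciones
instance (soluciones : List (List Int)) (out : List Int) :
    Decidable (Spec_pd_reconstruccion soluciones out) := by
  unfold Spec_pd_reconstruccion; infer_instance

-- ===== CLAIM (what is proved, stated in full; the proofs are below) =====
def Claim_equal_pd_reconstruccion : Prop :=
  ∀ (soluciones : List (List Int)), Dom_pd_reconstruccion soluciones →
    Pre_pd_reconstruccion soluciones →
    Spec_pd_reconstruccion soluciones (pd_reconstruccion soluciones)

-- ===== LEMMAS AND PROOFS =====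

-- the descending row list [n-1, …, 0] that A's outer loop traverses
def desc : Nat → List Int
  | 0 => []
  | n + 1 => (n : Int) :: desc n

theorem desc_eq_map (n : Nat) :
    desc n = (List.range n).map (fun (k : Nat) => (n : Int) - 1 - (k : Int)) := by
  induction n with
  | zero => rfl
  | succ m ih =>
      rw [List.range_succ_eq_map, List.map_cons, List.map_map]
      show desc (m + 1) = ((m : Int) + 1 - 1 - 0) :: _
      rw [desc, ih]
      congr 1
      · ring
      · apply List.map_congr_left
        intro k _
        simp only [Function.comp_apply]
        push_cast
        ring

theorem pyRange_desc (n : Nat) :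
    PySem.List.pyRange ((n : Int) - 1) (-1) (-1) = desc n := by
  rw [PySem.List.pyRange_neg_one, desc_eq_map]
  have : ((n : Int) - 1 - -1).toNat = n := by omega
  rw [this]

theorem desc_take (m j : Nat) (hj : j ≤ m) :
    (desc m).take j = (List.range j).map (fun (k : Nat) => (m : Int) - 1 - (k : Int)) := by
  rw [desc_eq_map, ← List.map_take, List.take_range, Nat.min_eq_left hj]

-- named form of max?'s fold step, and max? as a fold over it
def pvMaxStep {α : Type} (f : α → Int) (acc : Option α) (x : α) : Option α :=
  match acc with
  | none => some x
  | some m => if f m < f x then some x else some m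

theorem max?_eq_foldl_pvMaxStep {α : Type} (f : α → Int) (cs : List α) :
    PySem.List.max? cs f = cs.foldl (pvMaxStep f) none := by
  unfold PySem.List.max?
  apply List.foldl_ext
  intro a b _
  cases a <;> rfl

-- the fold keeps a nonnegative index when fed nonnegative indices
theorem pvMaxStep_fold_nonneg (f : Int → Int) :
    ∀ (cs : List Int) (a : Option Int),
      (∀ x ∈ cs, 0 ≤ x) → (∀ m, a = some m → 0 ≤ m) →
      ∀ m, cs.foldl (pvMaxStep f) a = some m → 0 ≤ m := by
  intro cs
  induction cs with
  | nil => intro a _ ha m hm; exact ha m hm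
  | cons x t ih =>
      intro a hcs ha m hm
      have hx : (0 : Int) ≤ x := hcs x List.mem_cons_self
      refine ih _ (fun y hy => hcs y (List.mem_cons_of_mem _ hy)) ?_ m hm
      intro mm hmm
      cases a with
      | none => simp only [pvMaxStep] at hmm; cases hmm; exact hx
      | some c =>
          have hc : (0 : Int) ≤ c := ha c rfl
          simp only [pvMaxStep] at hmm
          split at hmm
          · cases hmm; exact hx
          · cases hmm; exact hc

-- argmax over a descending column range is a nonnegative index (cited in decreasing_by)
theorem pvArgmax_nonneg (columnas : Int) (f : Int → Int) :
    0 ≤ PySem.List.maxD (PySem.List.pyRange (columnas - 1) (-1) (-1)) f 0 := by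
  unfold PySem.List.maxD
  rw [max?_eq_foldl_pvMaxStep]
  have hmem : ∀ x ∈ PySem.List.pyRange (columnas - 1) (-1) (-1), (0 : Int) ≤ x := by
    intro x hx
    have := PySem.List.mem_pyRange_neg_one.mp hx
    omega
  cases hmax : (PySem.List.pyRange (columnas - 1) (-1) (-1)).foldl (pvMaxStep f) none with
  | none => simp
  | some m => simpa using pvMaxStep_fold_nonneg f _ none hmem (by intro m h; cases h) m hmax

-- proof-only intermediate: the block-jumping loop with A's argmax formula
def pdAltLoop (soluciones : List (List Int)) (columnas : Int)
    (i : Int) (resultado : List Int) : List Int :=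
  if i < 0 then resultado
  else
    let fila := PySem.List.pyGetD soluciones i []
    let j := PySem.List.maxD (PySem.List.pyRange (columnas - 1) (-1) (-1))
               (fun c => PySem.List.pyGetD fila c 0) 0
    let resultado := resultado ++ (PySem.List.pyRange i (max (i - j) 0 - 1) (-1)).map (· + 1)
    pdAltLoop soluciones columnas (i - j - 2) resultado
termination_by (i + 1).toNat
decreasing_by
  have hj := pvArgmax_nonneg columnas (fun c => PySem.List.pyGetD (PySem.List.pyGetD soluciones i []) c 0)
  omega

-- A's argmax scan started after its first element agrees with max?'s fold
theorem pvInner_after (fila : List Int) :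
    ∀ (cs : List Int) (c : Int),
      (cs.foldl (pvInner fila) (some (PySem.List.pyGetD fila c 0), c)).2
        = (cs.foldl (pvMaxStep (fun c => PySem.List.pyGetD fila c 0)) (some c)).getD 0 := by
  intro cs
  induction cs with
  | nil => intro c; rfl
  | cons x t ih =>
      intro c
      simp only [List.foldl_cons, pvInner, pvMaxStep]
      split
      · exact ih x
      · exact ih c

-- A's argmax scan equals max? over the same column range
theorem pvInner_eq (fila : List Int) (cs : List Int) (h : cs ≠ []) :
    (cs.foldl (pvInner fila) (none, -1)).2
      = PySem.List.maxD cs (fun c => PySem.List.pyGetD fila c 0) 0 := by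
  cases cs with
  | nil => exact absurd rfl h
  | cons x t =>
      unfold PySem.List.maxD
      rw [max?_eq_foldl_pvMaxStep]
      simp only [List.foldl_cons, pvInner, pvMaxStep]
      exact pvInner_after fila t x

-- countdown phase of A: folding with state j appends the next min j m days then resumes with -1
theorem pvCountdown (sol : List (List Int)) (columnas : Int) :
    ∀ (m j : Nat) (acc : List Int),
      (desc m).foldl (pvStepA sol columnas) (acc, (j : Int)) =
        if m ≤ j then (acc ++ (desc m).map (· + 1), (j : Int) - m)
        else (desc (m - j - 1)).foldl (pvStepA sol columnas)
               (acc ++ ((desc m).take j).map (· + 1), -1) := by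
  intro m
  induction m with
  | zero =>
      intro j acc
      simp [desc]
  | succ m ih =>
      intro j acc
      simp only [desc, List.foldl_cons]
      cases j with
      | zero =>
          have h0 : pvStepA sol columnas (acc, ((0 : Nat) : Int)) (m : Int) = (acc, -1) := by
            simp [pvStepA]
          rw [h0, if_neg (by omega : ¬ (m + 1 ≤ 0))]
          simp
      | succ k =>
          have h2 : (((k + 1 : Nat) : Int)) ≠ 0 := by push_cast; omega
          have h3 : (((k + 1 : Nat) : Int)) ≠ -1 := by push_cast; omega
          have h1 : pvStepA sol columnas (acc, ((k + 1 : Nat) : Int)) (m : Int)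
              = (acc ++ [(m : Int) + 1], ((k : Nat) : Int)) := by
            simp only [pvStepA, h2, h3, if_false]
            rw [Prod.mk.injEq]
            refine ⟨rfl, by push_cast; ring⟩
          rw [h1, ih k (acc ++ [(m : Int) + 1])]
          by_cases hmk : m ≤ k
          · rw [if_pos hmk, if_pos (by omega : m + 1 ≤ k + 1)]
            simp only [List.map_cons, Prod.mk.injEq]
            constructor
            · simp
            · push_cast; ring
          · rw [if_neg hmk, if_neg (by omega : ¬ (m + 1 ≤ k + 1))]
            have hsub : m + 1 - (k + 1) - 1 = m - k - 1 := by omega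
            rw [hsub]
            congr 1
            simp only [List.take_succ_cons, List.map_cons, Prod.mk.injEq]
            exact ⟨by simp, trivial⟩

theorem pvMain (sol : List (List Int)) (columnas : Int) (hC : 1 ≤ columnas) :
    ∀ (n : Nat) (acc : List Int),
      ((desc n).foldl (pvStepA sol columnas) (acc, -1)).1
        = pdAltLoop sol columnas ((n : Int) - 1) acc := by
  intro n
  induction n using Nat.strong_induction_on with
  | _ n ih =>
      intro acc
      cases n with
      | zero =>
          rw [pdAltLoop]
          simp [desc]
      | succ m =>
          have hne : PySem.List.pyRange (columnas - 1) (-1) (-1) ≠ [] := by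
            rw [PySem.List.pyRange_neg_one]
            have : (columnas - 1 - -1).toNat = columnas.toNat := by omega
            rw [this]
            simp
            omega
          rw [show ((m + 1 : Nat) : Int) - 1 = (m : Int) by push_cast; ring]
          rw [pdAltLoop, if_neg (by omega : ¬ ((m : Int) < 0))]
          dsimp only []
          set jB : Int := PySem.List.maxD (PySem.List.pyRange (columnas - 1) (-1) (-1))
            (fun c => PySem.List.pyGetD (PySem.List.pyGetD sol (m : Int) []) c 0) 0 with hjB
          have hj0 : 0 ≤ jB := pvArgmax_nonneg columnas _
          have hstep : pvStepA sol columnas (acc, -1) (m : Int)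
              = (acc ++ [(m : Int) + 1], jB) := by
            simp only [pvStepA]
            norm_num
            rw [pvInner_eq _ _ hne, hjB]
            simp [PySem.List.pyGetD_natCast, List.getD_eq_getElem?_getD]
          simp only [desc, List.foldl_cons, hstep]
          rw [show jB = ((jB.toNat : Nat) : Int) by omega]
          rw [pvCountdown]
          set jn : Nat := jB.toNat with hjn
          by_cases hmj : m ≤ jn
          · rw [if_pos hmj]
            have hmax0 : max ((m : Int) - (jn : Int)) 0 = 0 := by omega
            rw [hmax0]
            have hr : PySem.List.pyRange (m : Int) ((0 : Int) - 1) (-1) = desc (m + 1) := by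
              have h := pyRange_desc (m + 1)
              rw [show ((m + 1 : Nat) : Int) - 1 = (m : Int) by push_cast; ring] at h
              rw [show ((0 : Int) - 1) = (-1 : Int) by ring]
              exact h
            rw [hr]
            rw [pdAltLoop, if_pos (by omega : (m : Int) - (jn : Int) - 2 < 0)]
            simp [desc]
          · rw [if_neg hmj]
            rw [ih (m - jn - 1) (by omega)]
            have hmax : max ((m : Int) - (jn : Int)) 0 = (m : Int) - (jn : Int) := by omega
            rw [hmax]
            have hseg : PySem.List.pyRange (m : Int) ((m : Int) - (jn : Int) - 1) (-1)
                = (m : Int) :: (desc m).take jn := by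
              rw [PySem.List.pyRange_neg_one]
              have hc : ((m : Int) - ((m : Int) - (jn : Int) - 1)).toNat = jn + 1 := by omega
              rw [hc, List.range_succ_eq_map, List.map_cons, List.map_map]
              rw [desc_take m jn (by omega)]
              simp only [List.cons.injEq]
              constructor
              · push_cast; ring
              · apply List.map_congr_left
                intro k _
                simp only [Function.comp_apply]
                push_cast; ring
            rw [hseg]
            have hidx : (((m - jn - 1 : Nat) : Int)) - 1 = (m : Int) - (jn : Int) - 2 := by omega
            rw [hidx]
            congr 1
            simp

-- pdAltLoop threads its accumulator by appending
theorem pdAltLoop_append (sol : List (List Int)) (c : Int) :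
    ∀ (i : Int) (acc : List Int),
      pdAltLoop sol c i acc = acc ++ pdAltLoop sol c i [] := by
  suffices h : ∀ (n : Nat) (i : Int), (i + 1).toNat = n → ∀ (acc : List Int),
      pdAltLoop sol c i acc = acc ++ pdAltLoop sol c i [] by
    intro i acc; exact h _ i rfl acc
  intro n
  induction n using Nat.strong_induction_on with
  | _ n ih =>
      intro i hn acc
      by_cases h : i < 0
      · conv_lhs => rw [pdAltLoop, if_pos h]
        conv_rhs => rw [pdAltLoop, if_pos h]
        simp
      · conv_lhs => rw [pdAltLoop, if_neg h]
        conv_rhs => rw [pdAltLoop, if_neg h]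
        dsimp only []
        have hj := pvArgmax_nonneg c
          (fun k => PySem.List.pyGetD (PySem.List.pyGetD sol i []) k 0)
        set j := PySem.List.maxD (PySem.List.pyRange (c - 1) (-1) (-1))
          (fun k => PySem.List.pyGetD (PySem.List.pyGetD sol i []) k 0) 0 with hjdef
        have hlt : (i - j - 2 + 1).toNat < n := by omega
        rw [ih _ hlt (i - j - 2) rfl, ih _ hlt (i - j - 2) rfl
              ([] ++ (PySem.List.pyRange i (max (i - j) 0 - 1) (-1)).map (· + 1))]
        simp

-- === argmax equality: A's right-to-left strict scan = last occurrence of the max ===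

-- max? is insensitive to a key change that agrees on the list's members
theorem max?_key_congr {α : Type} (k1 k2 : α → Int) :
    ∀ (l : List α) (init : Option α),
      (∀ x ∈ l, k1 x = k2 x) → (∀ m, init = some m → k1 m = k2 m) →
      l.foldl (pvMaxStep k1) init = l.foldl (pvMaxStep k2) init := by
  intro l
  induction l with
  | nil => intro init _ _; rfl
  | cons x t ih =>
      intro init hmem hinit
      have hx := hmem x List.mem_cons_self
      have hstep : pvMaxStep k1 init x = pvMaxStep k2 init x := by
        cases init with
        | none => rfl
        | some m => simp only [pvMaxStep, hinit m rfl, hx]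
      simp only [List.foldl_cons, hstep]
      apply ih _ (fun y hy => hmem y (List.mem_cons_of_mem _ hy))
      intro m hm
      cases init with
      | none => simp only [pvMaxStep] at hm; cases hm; exact hx
      | some mm =>
          simp only [pvMaxStep] at hm
          split at hm
          · cases hm; exact hx
          · cases hm; exact hinit _ rfl

-- max? over a mapped list
theorem max?_map {α β : Type} (f : α → β) (key : β → Int) (xs : List α) :
    PySem.List.max? (xs.map f) key = (PySem.List.max? xs (fun x => key (f x))).map f := by
  rw [max?_eq_foldl_pvMaxStep, max?_eq_foldl_pvMaxStep, List.foldl_map]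
  suffices h : ∀ (l : List α) (o : Option α),
      l.foldl (fun a x => pvMaxStep key a (f x)) (o.map f)
        = (l.foldl (pvMaxStep (fun x => key (f x))) o).map f by
    exact h xs none
  intro l
  induction l with
  | nil => intro o; rfl
  | cons x t ih =>
      intro o
      have hstep : pvMaxStep key (o.map f) (f x)
          = (pvMaxStep (fun x => key (f x)) o x).map f := by
        cases o with
        | none => rfl
        | some m =>
            simp only [pvMaxStep, Option.map_some]
            split <;> rfl
      simp only [List.foldl_cons, hstep, ih]

-- the maximum VALUE of a list is not changed by reversal
theorem max?_id_reverse (xs : List Int) :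
    (PySem.List.max? xs.reverse (fun x => x)).getD 0
      = (PySem.List.max? xs (fun x => x)).getD 0 := by
  cases xs with
  | nil => rfl
  | cons a t =>
      obtain ⟨m1, e1⟩ := Option.ne_none_iff_exists'.mp
        (fun h => by simpa using (PySem.List.max?_eq_none_iff _ _).mp h :
          PySem.List.max? (a :: t).reverse (fun x => x) ≠ none)
      obtain ⟨m2, e2⟩ := Option.ne_none_iff_exists'.mp
        (fun h => by simpa using (PySem.List.max?_eq_none_iff _ _).mp h :
          PySem.List.max? (a :: t) (fun x => x) ≠ none)
      rw [e1, e2, Option.getD_some, Option.getD_some]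
      exact le_antisymm
        (PySem.List.max?_isMax e2 m1 (List.mem_reverse.mp (PySem.List.max?_mem e1)))
        (PySem.List.max?_isMax e1 m2 (List.mem_reverse.mpr (PySem.List.max?_mem e2)))

-- first-extremal max? over indices = first occurrence of the maximum value
theorem firstArgmax (r : List Int) (h : r ≠ []) :
    PySem.List.max? (List.range r.length) (fun t => r.getD t 0)
      = PySem.List.index? r ((PySem.List.max? r (fun x => x)).getD 0) := by
  induction r using List.reverseRecOn with
  | nil => exact absurd rfl h
  | append_singleton r' x ih =>
      by_cases h' : r' = []
      · subst h'
        simp only [List.nil_append, List.length_singleton]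
        rw [show List.range 1 = [0] from rfl]
        rw [show PySem.List.max? [x] (fun y => y) = some x from rfl, Option.getD_some]
        rw [PySem.List.index?_cons_self]
        rfl
      · obtain ⟨m', em'⟩ := Option.ne_none_iff_exists'.mp
          (fun hh => h' ((PySem.List.max?_eq_none_iff r' (fun x : Int => x)).mp hh))
        have hm'mem : m' ∈ r' := PySem.List.max?_mem em'
        obtain ⟨p', hp'⟩ := Option.isSome_iff_exists.mp
          ((PySem.List.index?_isSome_iff r' m').mpr hm'mem)
        obtain ⟨hpl, hval, -⟩ := PySem.List.getElem_of_index?_eq_some hp'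
        have hkey : ∀ t ∈ List.range r'.length,
            (fun t => (r' ++ [x]).getD t 0) t = (fun t => r'.getD t 0) t := by
          intro t ht
          exact List.getD_append r' [x] 0 t (List.mem_range.mp ht)
        have hinner : (List.range r'.length).foldl
              (pvMaxStep (fun t => (r' ++ [x]).getD t 0)) none
            = PySem.List.index? r' m' := by
          rw [max?_key_congr _ _ _ none (fun t ht => hkey t ht) (by intro m hm; cases hm)]
          rw [← max?_eq_foldl_pvMaxStep]
          rw [ih h', em', Option.getD_some]
        have hkeyp : (r' ++ [x]).getD p' 0 = m' := by
          rw [List.getD_append r' [x] 0 p' hpl, List.getD_eq_getElem r' 0 hpl, hval]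
        have hkeyn : (r' ++ [x]).getD r'.length 0 = x := by
          rw [List.getD_eq_getElem _ 0 (by simp)]
          exact List.getElem_concat_length rfl _
        have hmaxr : PySem.List.max? (r' ++ [x]) (fun y => y)
            = if m' < x then some x else some m' := by
          rw [max?_eq_foldl_pvMaxStep, List.foldl_append, ← max?_eq_foldl_pvMaxStep, em']
          rfl
        rw [List.length_append, List.length_singleton, List.range_succ]
        rw [max?_eq_foldl_pvMaxStep, List.foldl_append, hinner, hp']
        simp only [List.foldl_cons, List.foldl_nil, pvMaxStep, hkeyp, hkeyn, hmaxr]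
        by_cases hcmp : m' < x
        · rw [if_pos hcmp, if_pos hcmp, Option.getD_some]
          have hxnot : x ∉ r' := fun hx => absurd (PySem.List.max?_isMax em' x hx) (by omega)
          rw [PySem.List.index?_append_singleton_self r' x hxnot]
        · rw [if_neg hcmp, if_neg hcmp, Option.getD_some]
          rw [PySem.List.index?_append_of_mem [x] hm'mem, hp']

-- A's argmax over the descending column range = B's last-occurrence-of-max formula
theorem argmax_eq (row : List Int) (c : Int) (hc : 1 ≤ c) (hlen : c ≤ (row.length : Int)) :
    PySem.List.maxD (PySem.List.pyRange (c - 1) (-1) (-1))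
        (fun k => PySem.List.pyGetD row k 0) 0
      = c - 1 - (((PySem.List.index?
            (PySem.List.slice row none (some c)).reverse
            ((PySem.List.max? (PySem.List.slice row none (some c)) (fun x => x)).getD 0)).getD 0
          : Nat) : Int) := by
  rw [PySem.List.slice_to row (by omega : (0:Int) ≤ c)]
  set n := c.toNat with hn
  have hcn : (n : Int) = c := by omega
  have hnl : n ≤ row.length := by omega
  set l := row.take n with hldef
  have hll : l.length = n := by
    rw [hldef, List.length_take]; omega
  have hlne : l ≠ [] := by
    intro h0; rw [h0] at hll; simp at hll; omega
  have hrne : l.reverse ≠ [] := by simpa using hlne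
  have hrlen : l.reverse.length = n := by simpa using hll
  obtain ⟨m0, em0⟩ := Option.ne_none_iff_exists'.mp
    (fun hh => hlne ((PySem.List.max?_eq_none_iff l (fun x : Int => x)).mp hh))
  have hmejmem : (PySem.List.max? l (fun x => x)).getD 0 ∈ l.reverse := by
    rw [em0, Option.getD_some]
    exact List.mem_reverse.mpr (PySem.List.max?_mem em0)
  obtain ⟨p, hp⟩ := Option.isSome_iff_exists.mp
    ((PySem.List.index?_isSome_iff l.reverse _).mpr hmejmem)
  obtain ⟨hpl, -, -⟩ := PySem.List.getElem_of_index?_eq_some hp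
  rw [hrlen] at hpl
  unfold PySem.List.maxD
  rw [PySem.List.pyRange_neg_one]
  rw [show (c - 1 - -1).toNat = n by omega]
  rw [max?_map (fun k : Nat => c - 1 - (k : Int)) (fun k => PySem.List.pyGetD row k 0)]
  have hck : PySem.List.max? (List.range n) (fun t => PySem.List.pyGetD row (c - 1 - (t : Int)) 0)
      = PySem.List.max? (List.range n) (fun t => l.reverse.getD t 0) := by
    rw [max?_eq_foldl_pvMaxStep, max?_eq_foldl_pvMaxStep]
    apply max?_key_congr
    · intro t ht
      have ht' : t < n := List.mem_range.mp ht
      have e1 : c - 1 - (t : Int) = ((n - 1 - t : Nat) : Int) := by omega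
      rw [e1, PySem.List.pyGetD_natCast]
      have h2 : n - 1 - t < row.length := by omega
      rw [List.getD_eq_getElem row 0 h2, hldef]
      rw [List.getD_eq_getElem _ 0 (by simp; omega)]
      rw [List.getElem_reverse]
      simp only [List.getElem_take]
      congr 1
      simp [List.length_take]
      omega
    · intro m hm; cases hm
  rw [hck, ← hrlen, firstArgmax l.reverse hrne]
  have hmr : (PySem.List.max? l.reverse (fun x : Int => x)).getD 0
      = (PySem.List.max? l (fun x : Int => x)).getD 0 := max?_id_reverse l
  rw [hmr, hp]
  simp

-- === B-side structure ===

theorem pdBLoop_neg (sol : List (List Int)) (c : Int) (fuel : Nat) (i : Int)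
    (acc : PySem.Set Int) (h : i < 0) : pdBLoop sol c fuel i acc = acc := by
  cases fuel with
  | zero => rfl
  | succ f => simp [pdBLoop, h]

-- pdBLoop only adds elements
theorem pdBLoop_mono (sol : List (List Int)) (c : Int) :
    ∀ (fuel : Nat) (i : Int) (acc : PySem.Set Int) (d : Int),
      d ∈ acc → d ∈ pdBLoop sol c fuel i acc := by
  intro fuel
  induction fuel with
  | zero => intro i acc d hd; exact hd
  | succ f ih =>
      intro i acc d hd
      rw [pdBLoop]
      split
      · exact hd
      · apply ih
        split
        · exact (PySem.Set.mem_add _ _ _).mpr (Or.inl hd)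
        · exact hd

-- the jump width pdBLoop computes at row i, as a named abbreviation for the proofs
def pvJB (sol : List (List Int)) (c i : Int) : Int :=
  c - 1 - (((PySem.List.index?
      (PySem.List.slice (PySem.List.pyGetD sol i []) none (some c)).reverse
      ((PySem.List.max? (PySem.List.slice (PySem.List.pyGetD sol i []) none (some c))
          (fun x => x)).getD 0)).getD 0 : Nat) : Int)

theorem pdBLoop_step (sol : List (List Int)) (c : Int) (fuel : Nat) (i : Int)
    (acc : PySem.Set Int) (h : ¬ i < 0) :
    pdBLoop sol c (fuel + 1) i acc
      = pdBLoop sol c fuel ((i - pvJB sol c i - 1) - 1)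
          (if 0 ≤ i - pvJB sol c i - 1 then PySem.Set.add acc (i - pvJB sol c i - 1)
           else acc) := by
  conv_lhs => rw [pdBLoop]
  rw [if_neg h]
  rfl

theorem pvJB_bounds (sol : List (List Int)) (c : Int) (hc : 1 ≤ c) (i : Int)
    (hrow : c ≤ ((PySem.List.pyGetD sol i []).length : Int)) :
    0 ≤ pvJB sol c i ∧ pvJB sol c i ≤ c - 1 := by
  unfold pvJB
  rw [PySem.List.slice_to _ (by omega : (0:Int) ≤ c)]
  set row := PySem.List.pyGetD sol i [] with hrowdef
  set n := c.toNat with hn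
  set l := row.take n with hldef
  have hll : l.length = n := by rw [hldef, List.length_take]; omega
  have hlne : l ≠ [] := by intro h0; rw [h0] at hll; simp at hll; omega
  obtain ⟨m0, em0⟩ := Option.ne_none_iff_exists'.mp
    (fun hh => hlne ((PySem.List.max?_eq_none_iff l (fun x : Int => x)).mp hh))
  have hmejmem : (PySem.List.max? l (fun x => x)).getD 0 ∈ l.reverse := by
    rw [em0, Option.getD_some]
    exact List.mem_reverse.mpr (PySem.List.max?_mem em0)
  obtain ⟨p, hp⟩ := Option.isSome_iff_exists.mp
    ((PySem.List.index?_isSome_iff l.reverse _).mpr hmejmem)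
  obtain ⟨hpl, -, -⟩ := PySem.List.getElem_of_index?_eq_some hp
  rw [List.length_reverse, hll] at hpl
  rw [hp, Option.getD_some]
  omega

-- every rest day collected from row i downward is ≤ i - 1 (or was already in acc)
theorem pdBLoop_bound (sol : List (List Int)) (c : Int) (hc : 1 ≤ c)
    (hrows : ∀ r ∈ sol, c ≤ (r.length : Int)) :
    ∀ (fuel : Nat) (i : Int) (acc : PySem.Set Int) (d : Int),
      i < (sol.length : Int) → d ∈ pdBLoop sol c fuel i acc → d ∈ acc ∨ d ≤ i - 1 := by
  intro fuel
  induction fuel with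
  | zero => intro i acc d _ hd; exact Or.inl hd
  | succ f ih =>
      intro i acc d hi hd
      by_cases h : i < 0
      · rw [pdBLoop_neg sol c (f + 1) i acc h] at hd; exact Or.inl hd
      · rw [pdBLoop_step sol c f i acc h] at hd
        have hrow : c ≤ ((PySem.List.pyGetD sol i []).length : Int) :=
          hrows _ (PySem.List.pyGetD_mem sol [] ⟨by omega, by omega⟩)
        obtain ⟨hj0, -⟩ := pvJB_bounds sol c hc i hrow
        rcases ih (i - pvJB sol c i - 1 - 1) _ d (by omega) hd with hacc | hle
        · by_cases h2 : 0 ≤ i - pvJB sol c i - 1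
          · rw [if_pos h2] at hacc
            rcases (PySem.Set.mem_add acc _ d).mp hacc with h3 | h3
            · exact Or.inl h3
            · right; omega
          · rw [if_neg h2] at hacc; exact Or.inl hacc
        · right; omega

theorem pvNotContains {d : Int} {S : PySem.Set Int} (h : d ∉ S) :
    (!(PySem.Set.contains S d)) = true := by
  rw [Bool.not_eq_true']
  exact Bool.eq_false_iff.mpr (fun hc => h (List.contains_iff_mem.mp hc))

theorem pvContainsTrue {d : Int} {S : PySem.Set Int} (h : d ∈ S) :
    (!(PySem.Set.contains S d)) = false := by
  rw [Bool.not_eq_false']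
  exact List.contains_iff_mem.mpr h

-- main correspondence: ascending complement of the rest set = reversed block emission
theorem pvFilterMain (sol : List (List Int)) (c : Int) (hc : 1 ≤ c)
    (hrows : ∀ r ∈ sol, c ≤ (r.length : Int)) :
    ∀ (fuel : Nat) (i : Int) (acc : PySem.Set Int),
      i < (sol.length : Int) → i + 1 ≤ (fuel : Int) → (∀ d ∈ acc, i < d) →
      ((PySem.List.pyRange 0 (i + 1) 1).filter
          (fun d => !(PySem.Set.contains (pdBLoop sol c fuel i acc) d))).map (· + 1)
        = (pdAltLoop sol c i []).reverse := by
  intro fuel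
  induction fuel with
  | zero =>
      intro i acc hi hf hacc
      have h : i < 0 := by push_cast at hf; omega
      rw [show pdBLoop sol c 0 i acc = acc from rfl,
          PySem.List.pyRange_one_eq_nil (by omega : i + 1 ≤ 0),
          pdAltLoop, if_pos h]
      rfl
  | succ f ih =>
      intro i acc hi hf hacc
      by_cases h : i < 0
      · rw [pdBLoop_neg sol c (f + 1) i acc h,
            PySem.List.pyRange_one_eq_nil (by omega : i + 1 ≤ 0),
            pdAltLoop, if_pos h]
        rfl
      · have hrow : c ≤ ((PySem.List.pyGetD sol i []).length : Int) :=
          hrows _ (PySem.List.pyGetD_mem sol [] ⟨by omega, by omega⟩)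
        obtain ⟨hj0, hjc⟩ := pvJB_bounds sol c hc i hrow
        have hjAB' : PySem.List.maxD (PySem.List.pyRange (c - 1) (-1) (-1))
            (fun k => PySem.List.pyGetD (PySem.List.pyGetD sol i []) k 0) 0
            = pvJB sol c i := argmax_eq (PySem.List.pyGetD sol i []) c hc hrow
        set j := pvJB sol c i with hjdef
        have hAstep : pdAltLoop sol c i []
            = (PySem.List.pyRange i (max (i - j) 0 - 1) (-1)).map (· + 1)
              ++ pdAltLoop sol c (i - j - 2) [] := by
          conv_lhs => rw [pdAltLoop, if_neg h]
          dsimp only []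
          rw [pdAltLoop_append, hjAB']
          simp
        rw [pdBLoop_step sol c f i acc h, ← hjdef]
        set S := pdBLoop sol c f (i - j - 1 - 1)
          (if 0 ≤ i - j - 1 then PySem.Set.add acc (i - j - 1) else acc) with hS
        by_cases h2 : 0 ≤ i - j - 1
        · rw [if_pos h2] at hS
          have hmax : max (i - j) 0 = i - j := by omega
          have ihh := ih (i - j - 1 - 1) (PySem.Set.add acc (i - j - 1)) (by omega)
            (by push_cast at hf ⊢; omega)
            (by intro d hd
                rcases (PySem.Set.mem_add acc _ d).mp hd with h3 | h3
                · have := hacc d h3; omega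
                · omega)
          rw [show i - j - 1 - 1 + 1 = i - j - 1 from by ring] at ihh
          rw [PySem.List.pyRange_one_append 0 (i - j - 1) (i + 1) (by omega) (by omega),
              PySem.List.pyRange_one_append (i - j - 1) ((i - j - 1) + 1) (i + 1)
                (by omega) (by omega)]
          rw [List.filter_append, List.filter_append, List.map_append, List.map_append]
          have hmem2 : (i - j - 1) ∈ S := by
            rw [hS]
            exact pdBLoop_mono sol c f _ _ _ ((PySem.Set.mem_add acc _ _).mpr (Or.inr rfl))
          have hp2 : (PySem.List.pyRange (i - j - 1) ((i - j - 1) + 1) 1).filter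
              (fun d => !(PySem.Set.contains S d)) = [] := by
            rw [PySem.List.pyRange_one_singleton, List.filter_singleton,
                pvContainsTrue hmem2]
            rfl
          have hp3 : (PySem.List.pyRange ((i - j - 1) + 1) (i + 1) 1).filter
              (fun d => !(PySem.Set.contains S d))
              = PySem.List.pyRange ((i - j - 1) + 1) (i + 1) 1 := by
            rw [List.filter_eq_self]
            intro d hd
            have hdr := PySem.List.mem_pyRange_one.mp hd
            apply pvNotContains
            intro hdS
            rcases pdBLoop_bound sol c hc hrows f _ _ d (by omega) (hS ▸ hdS) with hA | hB
            · rcases (PySem.Set.mem_add acc _ d).mp hA with h3 | h3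
              · have := hacc d h3; omega
              · omega
            · omega
          rw [← hS] at ihh
          rw [ihh, hp2, hp3]
          have hrev : ((PySem.List.pyRange i (i - j - 1) (-1)).map (· + 1)).reverse
              = (PySem.List.pyRange ((i - j - 1) + 1) (i + 1) 1).map (· + 1) := by
            rw [PySem.List.pyRange_neg_one_eq_reverse i (i - j - 1),
                List.map_reverse, List.reverse_reverse]
          rw [hAstep, hmax, List.reverse_append, hrev,
              show i - j - 2 = i - j - 1 - 1 from by ring]
          simp
        · rw [if_neg h2] at hS
          have hmax : max (i - j) 0 = 0 := by omega
          have hSacc : S = acc := by rw [hS]; exact pdBLoop_neg sol c f _ acc (by omega)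
          have hfilter : (PySem.List.pyRange 0 (i + 1) 1).filter
              (fun d => !(PySem.Set.contains S d)) = PySem.List.pyRange 0 (i + 1) 1 := by
            rw [List.filter_eq_self]
            intro d hd
            have hdr := PySem.List.mem_pyRange_one.mp hd
            apply pvNotContains
            rw [hSacc]
            intro h3
            have := hacc d h3
            omega
          have hz : pdAltLoop sol c (i - j - 2) [] = [] := by
            rw [pdAltLoop, if_pos (by omega : i - j - 2 < 0)]
          rw [hfilter, hAstep, hmax, hz, List.append_nil,
              show (0 : Int) - 1 = (-1 : Int) from by ring,
              PySem.List.pyRange_neg_one_eq_reverse i (-1),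
              List.map_reverse, List.reverse_reverse,
              show (-1 : Int) + 1 = 0 from by ring]

-- ===== VERDICT (by name: the statement is the Claim_ definition above) =====
theorem pd_reconstruccion_spec : Claim_equal_pd_reconstruccion := by
  intro sol _ hpre
  obtain ⟨hne, hC, hrows⟩ := hpre
  unfold Spec_pd_reconstruccion pd_reconstruccion pd_reconstruccion_alt
  dsimp only []
  rw [pyRange_desc sol.length]
  rw [pvMain sol _ (by exact_mod_cast hC) sol.length []]
  have hlen1 : 1 ≤ sol.length := by
    cases sol with
    | nil => exact absurd rfl hne
    | cons a t => simp
  have h := pvFilterMain sol (((PySem.List.pyGetD sol 0 []).length : Nat) : Int)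
        (by exact_mod_cast hC)
        (fun r hr => by exact_mod_cast hrows r hr)
        (sol.length + 1) ((sol.length : Int) - 1) PySem.Set.empty
        (by omega) (by push_cast; omega) (by intro d hd; cases hd)
  rw [show ((sol.length : Int) - 1 + 1) = (sol.length : Int) from by omega] at h
  exact h.symm
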